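-- pv_equiv track=rewrite | github.com/sameersemna/kubeflow-rag | scripts/run_pipeline.py | find_likely_namespace
-- ===== SOURCE A (Python) =====
-- def find_likely_namespace(target_namespace: str, available_namespaces):
--     non_system = [
--         ns
--         for ns in available_namespaces
--         if ns not in {"default"} and not ns.startswith("kube-")
--     ]
--
--     if not non_system:
--         return None
--
--     for ns in non_system:
--         if "kubeflow" in ns:
--             return ns
--     for ns in non_system:
--         if "pipeline" in ns or "ml-pipeline" in ns:
--             return ns
--     for ns in non_system:
--         if target_namespace in ns or ns in target_namespace:
--             return ns
--
--     return non_system[0]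
-- ===== SOURCE B (Python) =====
-- def find_likely_namespace(target_namespace: str, available_namespaces):
--     non_system = [
--         ns
--         for ns in available_namespaces
--         if ns not in {"default"} and not ns.startswith("kube-")
--     ]
--
--     if not non_system:
--         return None
--
--     def cheap_tier(ns):
--         if "kubeflow" in ns:
--             return 0
--         if "pipeline" in ns or "ml-pipeline" in ns:
--             return 1
--         return 2
--
--     best = min(non_system, key=cheap_tier)
--     if cheap_tier(best) < 2:
--         return best
--
--     return next(
--         (ns for ns in non_system
--          if target_namespace in ns or ns in target_namespace),
--         non_system[0],
--     )
-- ===== Notes on version B (the rewrite author's own statement) =====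
-- stated objective: alternative
-- what changed: Replaced A's three sequential fallback scans plus explicit [0] fallback by one stable min() pass under a cheap tier key, falling back to a single next()-with-default generator scan for the target-affinity tier.
import Mathlib
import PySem

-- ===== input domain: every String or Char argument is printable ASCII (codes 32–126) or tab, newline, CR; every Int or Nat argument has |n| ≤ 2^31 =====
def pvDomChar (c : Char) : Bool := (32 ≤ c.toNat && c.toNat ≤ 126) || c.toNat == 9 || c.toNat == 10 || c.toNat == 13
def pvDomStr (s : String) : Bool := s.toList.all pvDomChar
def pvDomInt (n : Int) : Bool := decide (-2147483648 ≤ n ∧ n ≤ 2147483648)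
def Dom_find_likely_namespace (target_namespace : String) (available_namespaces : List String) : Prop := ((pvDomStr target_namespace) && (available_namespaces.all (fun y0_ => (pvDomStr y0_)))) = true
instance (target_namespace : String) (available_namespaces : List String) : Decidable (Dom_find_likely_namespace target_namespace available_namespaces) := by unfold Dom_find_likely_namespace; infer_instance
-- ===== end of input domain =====

-- B replaces A's three sequential fallback scans and explicit [0] fallback by one stable
-- min-by-cheap-tier pass plus a single fallback target-affinity scan (objective: alternative).


-- ===== PORT A =====
-- non-system filter: ns not in {"default"} and not ns.startswith("kube-")
def fln_keep (ns : String) : Bool :=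
  !(ns == "default") && !(PySem.Str.startswith ns "kube-")

def find_likely_namespace (target_namespace : String) (available_namespaces : List String) : Option String :=
  let non_system := available_namespaces.filter fln_keep
  if non_system = [] then none
  else
    match non_system.find? (fun ns => PySem.Str.isIn "kubeflow" ns) with
    | some ns => some ns
    | none =>
      match non_system.find? (fun ns => PySem.Str.isIn "pipeline" ns || PySem.Str.isIn "ml-pipeline" ns) with
      | some ns => some ns
      | none =>
        match non_system.find? (fun ns => PySem.Str.isIn target_namespace ns || PySem.Str.isIn ns target_namespace) with
        | some ns => some ns
        | none => non_system.head?   -- non_system[0]; non_system ≠ [] here, so head? = some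

-- ===== PORT B =====
-- cheap_tier(ns): 0 kubeflow, 1 pipeline, 2 otherwise
def fln_cheap_tier (ns : String) : Nat :=
  if PySem.Str.isIn "kubeflow" ns then 0
  else if PySem.Str.isIn "pipeline" ns || PySem.Str.isIn "ml-pipeline" ns then 1
  else 2

def find_likely_namespace_alt (target_namespace : String) (available_namespaces : List String) : Option String :=
  let non_system := available_namespaces.filter fln_keep
  if non_system = [] then none
  else
    match PySem.List.min? non_system fln_cheap_tier with
    | none => none   -- unreachable: non_system ≠ []
    | some best =>
      if fln_cheap_tier best < 2 then some best
      else
        -- next((ns for ns in non_system if t in ns or ns in t), non_system[0])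
        match non_system.find? (fun ns => PySem.Str.isIn target_namespace ns || PySem.Str.isIn ns target_namespace) with
        | some ns => some ns
        | none => non_system.head?

-- ===== PRECONDITION & SPEC =====
def Spec_find_likely_namespace (target_namespace : String) (available_namespaces : List String) (out : Option String) : Prop := out = find_likely_namespace_alt target_namespace available_namespaces
instance (target_namespace : String) (available_namespaces : List String) (out : Option String) : Decidable (Spec_find_likely_namespace target_namespace available_namespaces out) := by unfold Spec_find_likely_namespace; infer_instance

-- ===== CLAIM (what is proved, stated in full; the proofs are below) =====
def Claim_equal_find_likely_namespace : Prop := ∀ (target_namespace : String) (available_namespaces : List String), Dom_find_likely_namespace target_namespace available_namespaces → Spec_find_likely_namespace target_namespace available_namespaces (find_likely_namespace target_namespace available_namespaces)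

-- ===== LEMMAS AND PROOFS =====

-- the foldl step underlying PySem.List.min?
-- If the accumulator is already minimal, the fold keeps it (strict < never replaces it).
theorem fln_foldl_keep {α : Type} (key : α → Nat) (xs : List α) (a : α)
    (h : ∀ y ∈ xs, key a ≤ key y) :
    xs.foldl (fun acc x =>
      match acc with
      | none => some x
      | some m => if key x < key m then some x else some m) (some a) = some a := by
  induction xs with
  | nil => rfl
  | cons y ys ih =>
    have hy : key a ≤ key y := h y (List.mem_cons_self)
    simp only [List.foldl_cons]
    have : (if key y < key a then some y else some a) = some a := by
      rw [if_neg]; omega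
    rw [this]
    exact ih (fun z hz => h z (List.mem_cons_of_mem _ hz))

-- If the first element of key value k (a lower bound on the list) appears in xs and
-- the accumulator is strictly worse than k, the fold returns that first element.
theorem fln_foldl_first {α : Type} (key : α → Nat) (k : Nat) :
    ∀ (xs : List α) (a m : α),
    xs.find? (fun y => key y == k) = some m →
    (∀ y ∈ xs, k ≤ key y) →
    k < key a →
    xs.foldl (fun acc x =>
      match acc with
      | none => some x
      | some m => if key x < key m then some x else some m) (some a) = some m := by
  intro xs
  induction xs with
  | nil => intro a m h; simp at h
  | cons y ys ih =>
    intro a m hfind hlb ha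
    by_cases hy : key y = k
    · have hm : m = y := by
        rw [List.find?_cons_of_pos (by simp [hy])] at hfind
        exact (Option.some.injEq _ _).mp hfind.symm
      subst hm
      simp only [List.foldl_cons]
      have : (if key m < key a then some m else some a) = some m := by
        rw [if_pos]; omega
      rw [this]
      exact fln_foldl_keep key ys m (fun z hz => hy ▸ hlb z (List.mem_cons_of_mem _ hz))
    · have hfind' : ys.find? (fun y => key y == k) = some m := by
        rwa [List.find?_cons_of_neg (by simp [hy])] at hfind
      have hky : k < key y := by
        have := hlb y (List.mem_cons_self); omega
      simp only [List.foldl_cons]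
      by_cases hlt : key y < key a
      · rw [if_pos hlt]
        exact ih y m hfind' (fun z hz => hlb z (List.mem_cons_of_mem _ hz)) hky
      · rw [if_neg hlt]
        exact ih a m hfind' (fun z hz => hlb z (List.mem_cons_of_mem _ hz)) ha

-- min? picks the first element achieving the (lower-bound) key value k.
theorem fln_min?_eq_first {α : Type} (key : α → Nat) (k : Nat) (xs : List α) (m : α)
    (hfind : xs.find? (fun y => key y == k) = some m)
    (hlb : ∀ y ∈ xs, k ≤ key y) :
    PySem.List.min? xs key = some m := by
  cases xs with
  | nil => simp at hfind
  | cons x t =>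
    show (x :: t).foldl _ none = some m
    simp only [List.foldl_cons]
    by_cases hx : key x = k
    · have hm : m = x := by
        rw [List.find?_cons_of_pos (by simp [hx])] at hfind
        exact (Option.some.injEq _ _).mp hfind.symm
      subst hm
      exact fln_foldl_keep key t m (fun z hz => hx ▸ hlb z (List.mem_cons_of_mem _ hz))
    · have hfind' : t.find? (fun y => key y == k) = some m := by
        rwa [List.find?_cons_of_neg (by simp [hx])] at hfind
      have hkx : k < key x := by
        have := hlb x (List.mem_cons_self); omega
      exact fln_foldl_first key k t x m hfind' (fun z hz => hlb z (List.mem_cons_of_mem _ hz)) hkx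

-- find? only depends on the predicate's values on the list's members
theorem fln_find?_congr {α : Type} (p q : α → Bool) :
    ∀ (xs : List α), (∀ y ∈ xs, p y = q y) → xs.find? p = xs.find? q := by
  intro xs
  induction xs with
  | nil => intro _; rfl
  | cons x t ih =>
    intro h
    have hx := h x (List.mem_cons_self)
    by_cases hp : p x = true
    · rw [List.find?_cons_of_pos hp, List.find?_cons_of_pos (hx ▸ hp)]
    · rw [List.find?_cons_of_neg hp, List.find?_cons_of_neg (by rw [← hx]; exact hp)]
      exact ih (fun z hz => h z (List.mem_cons_of_mem _ hz))

theorem find_likely_namespace_spec' (t : String) (avail : List String) :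
    find_likely_namespace t avail = find_likely_namespace_alt t avail := by
  unfold find_likely_namespace find_likely_namespace_alt
  set l := avail.filter fln_keep with hl
  by_cases hemp : l = []
  · simp [hemp]
  · simp only [if_neg hemp]
    set p0 : String → Bool := fun ns => PySem.Str.isIn "kubeflow" ns with hp0
    set p1 : String → Bool := fun ns => PySem.Str.isIn "pipeline" ns || PySem.Str.isIn "ml-pipeline" ns with hp1
    have hk0 : ∀ ns, (fln_cheap_tier ns == 0) = p0 ns := by
      intro ns; simp only [fln_cheap_tier, hp0]; split_ifs with h1 h2 <;> simp_all
    have hk1 : ∀ ns, p0 ns = false → (fln_cheap_tier ns == 1) = p1 ns := by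
      intro ns h; simp only [fln_cheap_tier, hp0] at *
      split_ifs with h1 h2 <;> simp_all
    have hk2 : ∀ ns, p0 ns = false → p1 ns = false → fln_cheap_tier ns = 2 := by
      intro ns h h'; simp only [fln_cheap_tier, hp0, hp1] at *
      split_ifs with h1 h2 <;> simp_all
    cases h0 : l.find? p0 with
    | some m =>
      have hfind : l.find? (fun y => fln_cheap_tier y == 0) = some m := by
        rw [fln_find?_congr _ p0 l (fun y _ => hk0 y)]; exact h0
      rw [fln_min?_eq_first fln_cheap_tier 0 l m hfind (fun y _ => Nat.zero_le _)]
      have hm0 : fln_cheap_tier m = 0 := by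
        have := List.find?_some hfind; simpa using this
      simp [hm0]
    | none =>
      have hno0 : ∀ y ∈ l, p0 y = false := by
        intro y hy; have := List.find?_eq_none.mp h0 y hy; simpa using this
      have hge1 : ∀ y ∈ l, 1 ≤ fln_cheap_tier y := by
        intro y hy
        have h := hno0 y hy
        simp only [fln_cheap_tier, hp0] at h ⊢
        split_ifs with h1 h2 <;> simp_all
      cases h1 : l.find? p1 with
      | some m =>
        have hfind : l.find? (fun y => fln_cheap_tier y == 1) = some m := by
          rw [fln_find?_congr _ p1 l (fun y hy => hk1 y (hno0 y hy))]; exact h1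
        rw [fln_min?_eq_first fln_cheap_tier 1 l m hfind hge1]
        have hm1 : fln_cheap_tier m = 1 := by
          have := List.find?_some hfind; simpa using this
        simp [hm1]
      | none =>
        have hno1 : ∀ y ∈ l, p1 y = false := by
          intro y hy; have := List.find?_eq_none.mp h1 y hy; simpa using this
        have hall2 : ∀ y ∈ l, fln_cheap_tier y = 2 := fun y hy =>
          hk2 y (hno0 y hy) (hno1 y hy)
        obtain ⟨x, xs, hx⟩ := List.exists_cons_of_ne_nil hemp
        rw [hx] at hall2 ⊢
        have hfind : (x :: xs).find? (fun y => fln_cheap_tier y == 2) = some x := by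
          rw [List.find?_cons_of_pos (by simp [hall2 x List.mem_cons_self])]
        rw [fln_min?_eq_first fln_cheap_tier 2 (x :: xs) x hfind (fun y hy => (hall2 y hy).ge)]
        simp [hall2 x List.mem_cons_self]

-- ===== VERDICT (by name: the statement is the Claim_ definition above) =====
theorem find_likely_namespace_spec : Claim_equal_find_likely_namespace := by
  intro t avail _
  exact find_likely_namespace_spec' t avail
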